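-- pv_equiv track=rewrite | github.com/WuKunhuan163/CLITools | logic/assistant/sandbox.py | _is_safe_read
-- ===== SOURCE A (Python) =====
-- SAFE_READ_PREFIXES = {
--     "cat", "ls", "find", "grep", "rg", "head", "tail", "wc",
--     "echo", "pwd", "whoami", "uname", "date", "env", "printenv",
--     "which", "type", "file", "stat", "du", "df",
--     "python3 -c", "python -c", "node -e",
--     "git status", "git log", "git diff", "git branch", "git show",
-- }
--
-- def _is_safe_read(cmd: str) -> bool:
--     """Check if a command is a known safe read-only command."""
--     stripped = cmd.strip()
--     if ">" in stripped or ">>" in stripped or "| tee " in stripped: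
--         return False
--     for prefix in SAFE_READ_PREFIXES:
--         if stripped.startswith(prefix):
--             if "&&" not in stripped and ";" not in stripped and "|" not in stripped:
--                 return True
--             parts = [p.strip() for p in stripped.replace("&&", ";").replace("|", ";").split(";")]
--             return all(
--                 any(p.startswith(pf) for pf in SAFE_READ_PREFIXES)
--                 for p in parts if p
--             )
--     return False
-- ===== SOURCE B (Python) =====
-- SAFE_READ_PREFIXES = {
--     "cat", "ls", "find", "grep", "rg", "head", "tail", "wc",
--     "echo", "pwd", "whoami", "uname", "date", "env", "printenv",
--     "which", "type", "file", "stat", "du", "df",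
--     "python3 -c", "python -c", "node -e",
--     "git status", "git log", "git diff", "git branch", "git show",
-- }
--
--
-- def _part_ok(part):
--     part = part.strip()
--     return not part or any(part.startswith(pf) for pf in SAFE_READ_PREFIXES)
--
--
-- def _is_safe_read(cmd: str) -> bool:
--     """Check if a command is a known safe read-only command."""
--     stripped = cmd.strip()
--     # Redirects (">" already covers ">>") and piping into tee are unsafe.
--     if ">" in stripped or "| tee " in stripped:
--         return False
--     # The command must open with a safe prefix.
--     if not any(stripped.startswith(pf) for pf in SAFE_READ_PREFIXES):
--         return False
--     # One left-to-right character scan: validate each '&&'/'|'/';'-chained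
--     # part as soon as its terminating separator (or the end) is reached.
--     cur = ""
--     i = 0
--     while i < len(stripped):
--         if stripped.startswith("&&", i):
--             if not _part_ok(cur):
--                 return False
--             cur = ""
--             i += 2
--         elif stripped[i] in ";|":
--             if not _part_ok(cur):
--                 return False
--             cur = ""
--             i += 1
--         else:
--             cur += stripped[i]
--             i += 1
--     return _part_ok(cur)
-- ===== Notes on version B (the rewrite author's own statement) =====
-- stated objective: alternative
-- what changed: Drops A's prefix-loop with its no-separator fast path and its string-rewriting tokenizer (replace '&&'->';', '|'->';', split on ';'); B instead checks the whole command once for a safe prefix and then validates the chained parts in a single left-to-right character scan with an accumulator, recognising '&&'/'|'/';' boundaries in place.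
import Mathlib
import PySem

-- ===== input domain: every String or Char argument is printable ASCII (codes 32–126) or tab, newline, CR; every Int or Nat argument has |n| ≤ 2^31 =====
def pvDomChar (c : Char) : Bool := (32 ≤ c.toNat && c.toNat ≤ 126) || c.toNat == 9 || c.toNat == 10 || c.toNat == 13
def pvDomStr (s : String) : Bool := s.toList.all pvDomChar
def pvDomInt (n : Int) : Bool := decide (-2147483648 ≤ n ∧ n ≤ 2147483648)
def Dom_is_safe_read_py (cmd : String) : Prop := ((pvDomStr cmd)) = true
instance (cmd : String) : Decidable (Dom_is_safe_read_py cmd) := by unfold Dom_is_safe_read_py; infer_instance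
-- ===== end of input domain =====

-- B replaces A's prefix loop + fast path + replace/replace/split tokenizer by a whole-command
-- prefix check followed by one left-to-right character scan over the chained parts (objective: alternative).

-- ===== PORT A =====
-- SAFE_READ_PREFIXES, in source order.  A's loop body does not depend on WHICH
-- prefix matched, so the Python set's iteration order cannot affect the result.
def safePrefixesA : List (List Char) :=
  ["cat".toList, "ls".toList, "find".toList, "grep".toList, "rg".toList, "head".toList,
   "tail".toList, "wc".toList, "echo".toList, "pwd".toList, "whoami".toList, "uname".toList,
   "date".toList, "env".toList, "printenv".toList, "which".toList, "type".toList,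
   "file".toList, "stat".toList, "du".toList, "df".toList,
   "python3 -c".toList, "python -c".toList, "node -e".toList,
   "git status".toList, "git log".toList, "git diff".toList, "git branch".toList,
   "git show".toList]

-- parts = [p.strip() for p in stripped.replace("&&", ";").replace("|", ";").split(";")]
def partsA (stripped : List Char) : List (List Char) :=
  (PySem.Chars.splitOn
      (PySem.Chars.replace (PySem.Chars.replace stripped "&&".toList ";".toList)
        "|".toList ";".toList)
      ";".toList).map PySem.Chars.strip

-- all(any(p.startswith(pf) for pf in SAFE_READ_PREFIXES) for p in parts if p)
def allSafeA (stripped : List Char) : Bool :=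
  ((partsA stripped).filter (fun p => !p.isEmpty)).all
    (fun p => safePrefixesA.any (fun pf => PySem.Chars.startswith p pf))

-- the 'for prefix in SAFE_READ_PREFIXES' loop with its early returns
def loopA (stripped : List Char) : List (List Char) → Bool
  | [] => false
  | pf :: rest =>
    if PySem.Chars.startswith stripped pf then
      if !PySem.Chars.isIn "&&".toList stripped && !PySem.Chars.isIn ";".toList stripped
          && !PySem.Chars.isIn "|".toList stripped then true
      else allSafeA stripped
    else loopA stripped rest

def is_safe_read_py (cmd : String) : Bool :=
  let stripped := PySem.Chars.strip cmd.toList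
  if PySem.Chars.isIn ">".toList stripped || PySem.Chars.isIn ">>".toList stripped
      || PySem.Chars.isIn "| tee ".toList stripped then false
  else loopA stripped safePrefixesA

-- ===== PORT B =====
def safePrefixesB : List (List Char) :=
  ["cat".toList, "ls".toList, "find".toList, "grep".toList, "rg".toList, "head".toList,
   "tail".toList, "wc".toList, "echo".toList, "pwd".toList, "whoami".toList, "uname".toList,
   "date".toList, "env".toList, "printenv".toList, "which".toList, "type".toList,
   "file".toList, "stat".toList, "du".toList, "df".toList,
   "python3 -c".toList, "python -c".toList, "node -e".toList,
   "git status".toList, "git log".toList, "git diff".toList, "git branch".toList,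
   "git show".toList]

-- _part_ok(part): part = part.strip(); return not part or any(part.startswith(pf) ...)
def partOkB (part : List Char) : Bool :=
  let p := PySem.Chars.strip part
  p.isEmpty || safePrefixesB.any (fun pf => PySem.Chars.startswith p pf)

-- the while loop over i: cur is the accumulated current part, rest = stripped[i:]
def scanB (cur : List Char) : List Char → Bool
  | [] => partOkB cur
  | c :: t =>
    if "&&".toList.isPrefixOf (c :: t) then
      partOkB cur && scanB [] ((c :: t).drop 2)
    else if c = ';' ∨ c = '|' then
      partOkB cur && scanB [] t
    else
      scanB (cur ++ [c]) t
termination_by l => l.length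
decreasing_by
  all_goals simp

def is_safe_read_py_alt (cmd : String) : Bool :=
  let stripped := PySem.Chars.strip cmd.toList
  -- redirects (">" already covers ">>") and piping into tee are unsafe
  if PySem.Chars.isIn ">".toList stripped || PySem.Chars.isIn "| tee ".toList stripped then
    false
  -- the command must open with a safe prefix
  else if !(safePrefixesB.any (fun pf => PySem.Chars.startswith stripped pf)) then false
  -- one left-to-right scan validating each '&&'/'|'/';'-chained part
  else scanB [] stripped

-- ===== PRECONDITION & SPEC =====
def Spec_is_safe_read_py (cmd : String) (out : Bool) : Prop := out = is_safe_read_py_alt cmd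
instance (cmd : String) (out : Bool) : Decidable (Spec_is_safe_read_py cmd out) := by unfold Spec_is_safe_read_py; infer_instance

-- ===== CLAIM (what is proved, stated in full; the proofs are below) =====
def Claim_equal_is_safe_read_py : Prop := ∀ (cmd : String), Dom_is_safe_read_py cmd → Spec_is_safe_read_py cmd (is_safe_read_py cmd)

-- ===== LEMMAS AND PROOFS =====

-- proof-only helpers: a structural segmentation of the command into its chained parts
def mapHead (f : List Char → List Char) : List (List Char) → List (List Char)
  | [] => []
  | x :: xs => f x :: xs

-- structural version of stripped.replace("&&", ";")
def rep2 : List Char → List Char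
  | [] => []
  | c :: t =>
    if "&&".toList.isPrefixOf (c :: t) then ';' :: rep2 (t.drop 1) else c :: rep2 t
termination_by l => l.length
decreasing_by
  all_goals simp

-- structural version of  .replace("|", ";")
def rep1 : List Char → List Char
  | [] => []
  | c :: t => if "|".toList.isPrefixOf (c :: t) then ';' :: rep1 t else c :: rep1 t

-- structural version of  .split(";")
def splitS : List Char → List (List Char)
  | [] => [[]]
  | c :: t => if ";".toList.isPrefixOf (c :: t) then [] :: splitS t else mapHead (c :: ·) (splitS t)

-- the segmentation the scanner walks: boundaries at "&&" (length 2), ';', '|'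
def segs : List Char → List (List Char)
  | [] => [[]]
  | c :: t =>
    if "&&".toList.isPrefixOf (c :: t) then [] :: segs (t.drop 1)
    else if c = ';' ∨ c = '|' then [] :: segs t
    else mapHead (c :: ·) (segs t)
termination_by l => l.length
decreasing_by
  all_goals simp

theorem rep2_go (fuel : Nat) (l acc : List Char) (h : l.length ≤ fuel) :
    PySem.Chars.replace.go "&&".toList ";".toList fuel l acc = acc.reverse ++ rep2 l := by
  induction fuel generalizing l acc with
  | zero =>
    rw [PySem.Chars.replace.go]
    have : l = [] := by cases l with | nil => rfl | cons a t => simp at h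
    subst this; simp [rep2]
  | succ n ih =>
    cases l with
    | nil => rw [PySem.Chars.replace.go]; simp [rep2]; omega
    | cons c t =>
      rw [PySem.Chars.replace.go, rep2]
      by_cases hp : "&&".toList.isPrefixOf (c :: t) = true
      · rw [if_pos hp, if_pos hp]
        rw [ih]
        · simp
        · simp at h ⊢; omega
      · rw [if_neg hp, if_neg hp, ih]
        · simp
        · simp at h; omega

theorem rep1_go (fuel : Nat) (l acc : List Char) (h : l.length ≤ fuel) :
    PySem.Chars.replace.go "|".toList ";".toList fuel l acc = acc.reverse ++ rep1 l := by
  induction fuel generalizing l acc with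
  | zero =>
    rw [PySem.Chars.replace.go]
    have : l = [] := by cases l with | nil => rfl | cons a t => simp at h
    subst this; simp [rep1]
  | succ n ih =>
    cases l with
    | nil => rw [PySem.Chars.replace.go]; simp [rep1]; omega
    | cons c t =>
      rw [PySem.Chars.replace.go, rep1]
      by_cases hp : "|".toList.isPrefixOf (c :: t) = true
      · rw [if_pos hp, if_pos hp]
        rw [ih]
        · simp
        · simp at h ⊢; omega
      · rw [if_neg hp, if_neg hp, ih]
        · simp
        · simp at h; omega

theorem splitS_go (fuel : Nat) (l cur : List Char) (acc : List (List Char))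
    (h : l.length ≤ fuel) :
    PySem.Chars.splitOn.go ";".toList fuel l cur acc
      = acc.reverse ++ mapHead (cur.reverse ++ ·) (splitS l) := by
  induction fuel generalizing l cur acc with
  | zero =>
    rw [PySem.Chars.splitOn.go]
    have : l = [] := by cases l with | nil => rfl | cons a t => simp at h
    subst this; simp [splitS, mapHead]
  | succ n ih =>
    cases l with
    | nil => rw [PySem.Chars.splitOn.go]; simp [splitS, mapHead]; omega
    | cons c t =>
      rw [PySem.Chars.splitOn.go, splitS]
      by_cases hp : ";".toList.isPrefixOf (c :: t) = true
      · rw [if_pos hp, if_pos hp]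
        rw [ih]
        · cases hs : splitS t with
          | nil => simp [mapHead, hs]
          | cons x xs => simp [mapHead, hs]
        · simp at h ⊢; omega
      · rw [if_neg hp, if_neg hp, ih]
        · cases splitS t with
          | nil => simp [mapHead]
          | cons x xs => simp [mapHead]
        · simp at h; omega

theorem replace_eq_rep2 (s : List Char) :
    PySem.Chars.replace s "&&".toList ";".toList = rep2 s := by
  rw [PySem.Chars.replace]
  simp only [show ("&&".toList.isEmpty = false) from rfl, Bool.false_eq_true, if_false]
  simpa using rep2_go s.length s [] le_rfl

theorem replace_eq_rep1 (s : List Char) :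
    PySem.Chars.replace s "|".toList ";".toList = rep1 s := by
  rw [PySem.Chars.replace]
  simp only [show ("|".toList.isEmpty = false) from rfl, Bool.false_eq_true, if_false]
  simpa using rep1_go s.length s [] le_rfl

theorem splitOn_eq_splitS (s : List Char) :
    PySem.Chars.splitOn s ";".toList = splitS s := by
  rw [PySem.Chars.splitOn]
  rw [splitS_go (s.length + 1) s [] [] (by omega)]
  cases hs : splitS s with
  | nil => simp [mapHead]
  | cons x xs => simp [mapHead]

theorem comp_segs (s : List Char) : splitS (rep1 (rep2 s)) = segs s := by
  induction s using segs.induct with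
  | case1 => simp [rep2, rep1, splitS, segs]
  | case2 c t hp ih =>
    rw [rep2, if_pos hp]
    rw [rep1, if_neg (by simp [List.isPrefixOf])]
    rw [splitS, if_pos (by simp [List.isPrefixOf])]
    rw [segs, if_pos hp, ih]
  | case3 c t hp hco ih =>
    rw [rep2, if_neg hp]
    rcases hco with hc | hc <;> subst hc
    · rw [rep1, if_neg (by simp [List.isPrefixOf])]
      rw [splitS, if_pos (by simp [List.isPrefixOf])]
      rw [segs, if_neg hp, if_pos (by simp), ih]
    · rw [rep1, if_pos (by simp [List.isPrefixOf])]
      rw [splitS, if_pos (by simp [List.isPrefixOf])]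
      rw [segs, if_neg hp, if_pos (by simp), ih]
  | case4 c t hp hco ih =>
    have hc1 : c ≠ ';' := fun h => hco (Or.inl h)
    have hc2 : c ≠ '|' := fun h => hco (Or.inr h)
    rw [rep2, if_neg hp]
    rw [rep1, if_neg (by simp [List.isPrefixOf]; exact fun h => hc2 h.symm)]
    rw [splitS, if_neg (by simp [List.isPrefixOf]; exact fun h => hc1 h.symm)]
    rw [segs, if_neg hp, if_neg (by simp [hc1, hc2]), ih]

theorem segs_ne_nil (s : List Char) : segs s ≠ [] := by
  induction s using segs.induct with
  | case1 => simp [segs]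
  | case2 c t hp ih => rw [segs, if_pos hp]; simp
  | case3 c t hp hco ih => rw [segs, if_neg hp, if_pos hco]; simp
  | case4 c t hp hco ih =>
    rw [segs, if_neg hp, if_neg hco]
    cases hs : segs t with
    | nil => exact absurd hs ih
    | cons x xs => simp [mapHead]

theorem scanB_segs (s cur : List Char) :
    scanB cur s = (mapHead (cur ++ ·) (segs s)).all partOkB := by
  induction s using segs.induct generalizing cur with
  | case1 => simp [scanB, segs, mapHead]
  | case2 c t hp ih =>
    rw [scanB, if_pos hp, segs, if_pos hp, List.drop_succ_cons, ih]
    cases hs : segs (t.drop 1) with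
    | nil => exact absurd hs (segs_ne_nil _)
    | cons x xs => simp [mapHead]
  | case3 c t hp hco ih =>
    rw [scanB, if_neg hp, if_pos hco, segs, if_neg hp, if_pos hco, ih]
    cases hs : segs t with
    | nil => exact absurd hs (segs_ne_nil _)
    | cons x xs => simp [mapHead]
  | case4 c t hp hco ih =>
    rw [scanB, if_neg hp, if_neg hco, segs, if_neg hp, if_neg hco, ih]
    cases hs : segs t with
    | nil => exact absurd hs (segs_ne_nil _)
    | cons x xs => simp [mapHead]

theorem filter_all_partOk (l : List (List Char)) :
    ((l.map PySem.Chars.strip).filter (fun p => !p.isEmpty)).all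
        (fun p => safePrefixesA.any (fun pf => PySem.Chars.startswith p pf))
      = l.all partOkB := by
  induction l with
  | nil => rfl
  | cons x xs ih =>
    rw [List.map_cons]
    by_cases hx : (PySem.Chars.strip x).isEmpty = true
    · rw [List.filter_cons_of_neg (by simp [hx]), ih]
      simp [partOkB, hx]
    · rw [List.filter_cons_of_pos (by simp [hx]), List.all_cons, ih]
      simp [partOkB, hx, show safePrefixesB = safePrefixesA from rfl]

theorem allSafeA_eq_scanB (s : List Char) : allSafeA s = scanB [] s := by
  rw [scanB_segs]
  have hm : mapHead (([] : List Char) ++ ·) (segs s) = segs s := by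
    cases hs : segs s with
    | nil => simp [mapHead]
    | cons x xs => simp [mapHead]
  rw [hm]
  rw [allSafeA, partsA, replace_eq_rep2, replace_eq_rep1, splitOn_eq_splitS, comp_segs]
  exact filter_all_partOk (segs s)

theorem dropWhile_idem {α : Type} (p : α → Bool) (l : List α) :
    List.dropWhile p (List.dropWhile p l) = List.dropWhile p l := by
  induction l with
  | nil => rfl
  | cons a t ih =>
    by_cases h : p a = true
    · simp [List.dropWhile, h, ih]
    · simp [List.dropWhile, h]

theorem strip_strip (l : List Char) :
    PySem.Chars.strip (PySem.Chars.strip l) = PySem.Chars.strip l := by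
  unfold PySem.Chars.strip PySem.Chars.rstrip PySem.Chars.lstrip
  set p := PySem.Chars.isspace
  set m := List.dropWhile p l with hm
  set t := (List.dropWhile p m.reverse).reverse with ht
  have hpre : t <+: m := by
    have h0 : List.dropWhile p m.reverse <:+ m.reverse := List.dropWhile_suffix p
    rw [ht]
    simpa using List.reverse_prefix.mpr h0
  have h1 : List.dropWhile p t = t := by
    cases htc : t with
    | nil => rfl
    | cons a u =>
      have ha : p a = false := by
        obtain ⟨r, hr⟩ := hpre
        have hl : List.dropWhile p l = a :: (u ++ r) := by
          rw [← hm, ← hr, htc]; simp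
        have h2 := List.head?_dropWhile_not p l
        rw [hl] at h2
        simpa using h2
      simp [List.dropWhile, ha]
  rw [h1, List.reverse_reverse, dropWhile_idem]

theorem loopA_eq (s : List Char) (l : List (List Char)) :
    loopA s l =
      ((l.any fun pf => PySem.Chars.startswith s pf) &&
        (if !PySem.Chars.isIn "&&".toList s && !PySem.Chars.isIn ";".toList s
            && !PySem.Chars.isIn "|".toList s then true else allSafeA s)) := by
  induction l with
  | nil => rfl
  | cons pf rest ih =>
    by_cases h : PySem.Chars.startswith s pf = true
    · simp [loopA, h]
    · simp [loopA, h, ih]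

-- on a separator-free stripped command that opens with a safe prefix, the scan succeeds
theorem segs_nosep : ∀ s : List Char, ¬ "&&".toList <:+: s → ¬ ";".toList <:+: s →
    ¬ "|".toList <:+: s → segs s = [s] := by
  intro s
  induction s with
  | nil => intro _ _ _; simp [segs]
  | cons c t ih =>
    intro h1 h2 h3
    have hcp : ¬ ("&&".toList.isPrefixOf (c :: t) = true) := by
      intro hpre
      exact h1 (List.IsPrefix.isInfix (List.isPrefixOf_iff_prefix.mp hpre))
    have hc1 : c ≠ ';' := by
      intro hc; subst hc
      exact h2 (List.IsPrefix.isInfix ⟨t, rfl⟩)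
    have hc2 : c ≠ '|' := by
      intro hc; subst hc
      exact h3 (List.IsPrefix.isInfix ⟨t, rfl⟩)
    have ht : segs t = [t] := by
      apply ih
      · exact fun hi => h1 (hi.trans (List.suffix_cons c t).isInfix)
      · exact fun hi => h2 (hi.trans (List.suffix_cons c t).isInfix)
      · exact fun hi => h3 (hi.trans (List.suffix_cons c t).isInfix)
    rw [segs, if_neg hcp, if_neg (by simp [hc1, hc2]), ht]
    simp [mapHead]

theorem allSafeA_nosep (s : List Char) (hss : PySem.Chars.strip s = s)
    (hany : (safePrefixesA.any fun pf => PySem.Chars.startswith s pf) = true)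
    (hns : (!PySem.Chars.isIn "&&".toList s && !PySem.Chars.isIn ";".toList s
        && !PySem.Chars.isIn "|".toList s) = true) :
    allSafeA s = true := by
  obtain ⟨⟨hn1, hn2⟩, hn3⟩ : (PySem.Chars.isIn "&&".toList s = false
      ∧ PySem.Chars.isIn ";".toList s = false) ∧ PySem.Chars.isIn "|".toList s = false := by
    simpa [Bool.and_eq_true] using hns
  have hsegs : segs s = [s] :=
    segs_nosep s ((PySem.Chars.isIn_eq_false_iff _ s).mp hn1)
      ((PySem.Chars.isIn_eq_false_iff _ s).mp hn2) ((PySem.Chars.isIn_eq_false_iff _ s).mp hn3)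
  rw [allSafeA, partsA, replace_eq_rep2, replace_eq_rep1, splitOn_eq_splitS, comp_segs, hsegs]
  rw [List.map_cons, List.map_nil, hss]
  by_cases hse : s.isEmpty = true
  · simp [List.filter, hse]
  · simp [List.filter, hse, hany]

-- ===== VERDICT (by name: the statement is the Claim_ definition above) =====
theorem is_safe_read_py_spec : Claim_equal_is_safe_read_py := by
  intro cmd _
  unfold Spec_is_safe_read_py is_safe_read_py is_safe_read_py_alt
  dsimp only
  set s := PySem.Chars.strip cmd.toList with hsdef
  have hss : PySem.Chars.strip s = s := strip_strip cmd.toList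
  have hguard : (PySem.Chars.isIn ">".toList s || PySem.Chars.isIn ">>".toList s
      || PySem.Chars.isIn "| tee ".toList s)
      = (PySem.Chars.isIn ">".toList s || PySem.Chars.isIn "| tee ".toList s) := by
    cases h2 : PySem.Chars.isIn ">>".toList s with
    | false => rw [Bool.or_false]
    | true =>
      have h1 : PySem.Chars.isIn ">".toList s = true := by
        rw [PySem.Chars.isIn_iff_infix] at h2 ⊢
        exact List.IsInfix.trans (by decide) h2
      rw [h1]
      simp
  rw [hguard]
  cases hg : (PySem.Chars.isIn ">".toList s || PySem.Chars.isIn "| tee ".toList s) with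
  | true => rfl
  | false =>
    simp only [Bool.false_eq_true, if_false]
    rw [loopA_eq]
    have hBA : safePrefixesB = safePrefixesA := rfl
    rw [hBA]
    cases hany : (safePrefixesA.any fun pf => PySem.Chars.startswith s pf) with
    | false => simp
    | true =>
      rw [Bool.true_and]
      simp only [Bool.not_true, Bool.false_eq_true, if_false]
      by_cases hns : (!PySem.Chars.isIn "&&".toList s && !PySem.Chars.isIn ";".toList s
          && !PySem.Chars.isIn "|".toList s) = true
      · rw [if_pos hns, ← allSafeA_eq_scanB, allSafeA_nosep s hss hany hns]
      · rw [if_neg hns, ← allSafeA_eq_scanB]
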